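-- pv_equiv track=rewrite | github.com/HemanthBojja/Phishing-and-Encryption-Attack | monitor.py | mode_to_string
-- ===== SOURCE A (Python) =====
-- def mode_to_string(mode):
--     perms = ""
--     for i in range(2, -1, -1):  # Owner, group, others
--         value = (mode >> (i * 3)) & 0o7
--         perms += "r" if value & 4 else "-"
--         perms += "w" if value & 2 else "-"
--         perms += "x" if value & 1 else "-"
--     return perms
-- ===== SOURCE B (Python) =====
-- TABLE = ['---', '--x', '-w-', '-wx', 'r--', 'r-x', 'rw-', 'rwx']
--
-- def mode_to_string(mode):
--     return ''.join(TABLE[(mode >> s) & 0o7] for s in (6, 3, 0))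
-- ===== Notes on version B (the rewrite author's own statement) =====
-- stated objective: simpler
-- what changed: Replaces the nine per-bit branch tests accumulated in a loop by a precomputed lookup table of the eight permission strings indexed by each octal digit, joined in one expression.
import Mathlib
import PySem

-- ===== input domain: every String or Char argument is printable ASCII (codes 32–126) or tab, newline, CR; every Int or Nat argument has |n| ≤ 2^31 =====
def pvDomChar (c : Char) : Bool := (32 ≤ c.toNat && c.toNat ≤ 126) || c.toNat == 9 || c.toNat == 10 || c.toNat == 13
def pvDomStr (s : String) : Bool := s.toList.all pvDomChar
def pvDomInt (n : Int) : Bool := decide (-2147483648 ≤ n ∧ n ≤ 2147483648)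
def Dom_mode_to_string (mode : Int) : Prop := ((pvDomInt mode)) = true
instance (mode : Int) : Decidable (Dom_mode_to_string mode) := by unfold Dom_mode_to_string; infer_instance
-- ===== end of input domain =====

-- B replaces A's nine per-bit branch tests with an 8-entry lookup table indexed per octal digit (simpler).


-- ===== PORT A =====
def mode_to_string (mode : Int) : String :=
  (PySem.List.pyRange 2 (-1) (-1)).foldl (fun perms i =>
    let value := PySem.Int.band (mode >>> (i * 3).toNat) 7
    let perms := perms ++ (if PySem.Int.band value 4 ≠ 0 then "r" else "-")
    let perms := perms ++ (if PySem.Int.band value 2 ≠ 0 then "w" else "-")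
    perms ++ (if PySem.Int.band value 1 ≠ 0 then "x" else "-")) ""

-- ===== PORT B =====
def pvTable : List String := ["---", "--x", "-w-", "-wx", "r--", "r-x", "rw-", "rwx"]

def mode_to_string_alt (mode : Int) : String :=
  String.join (([6, 3, 0] : List Int).map
    (fun s => pvTable.getD (PySem.Int.band (mode >>> s) 7).toNat "---"))

-- ===== PRECONDITION & SPEC =====
def Spec_mode_to_string (mode : Int) (out : String) : Prop := out = mode_to_string_alt mode
instance (mode : Int) (out : String) : Decidable (Spec_mode_to_string mode out) := by unfold Spec_mode_to_string; infer_instance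

-- ===== CLAIM (what is proved, stated in full; the proofs are below) =====
def Claim_equal_mode_to_string : Prop := ∀ (mode : Int), Dom_mode_to_string mode → Spec_mode_to_string mode (mode_to_string mode)

-- ===== LEMMAS AND PROOFS =====

theorem band7_bounds (a : Int) : 0 ≤ PySem.Int.band a 7 ∧ PySem.Int.band a 7 < 8 := by
  unfold PySem.Int.band
  have h7 : ((7:Int)).toNat = 7 := rfl
  split_ifs with h1 h2 h2
  · have := Nat.and_le_right (n := a.toNat) (m := (7:Int).toNat); omega
  · omega
  · have := Nat.and_le_left (n := ((7:Int)).toNat) (m := (-a - 1).toNat); omega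
  · omega

-- A's per-digit branch cascade agrees with B's table lookup on any masked value.
theorem digit_eq (a : Int) :
    ((if PySem.Int.band (PySem.Int.band a 7) 4 ≠ 0 then "r" else "-") ++
     (if PySem.Int.band (PySem.Int.band a 7) 2 ≠ 0 then "w" else "-") ++
     (if PySem.Int.band (PySem.Int.band a 7) 1 ≠ 0 then "x" else "-")) =
    pvTable.getD (PySem.Int.band a 7).toNat "---" := by
  obtain ⟨h0, h8⟩ := band7_bounds a
  set v := PySem.Int.band a 7 with hv
  clear_value v
  interval_cases v <;> decide

theorem mode_to_string_spec : Claim_equal_mode_to_string := by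
  intro mode _
  unfold Spec_mode_to_string mode_to_string mode_to_string_alt
  have hr : PySem.List.pyRange 2 (-1) (-1) = [2, 1, 0] := by decide
  rw [hr]
  have h2 := digit_eq (mode >>> (6 : Int))
  have h1 := digit_eq (mode >>> (3 : Int))
  have h0 := digit_eq (mode >>> (0 : Int))
  simp only [List.foldl, List.map, String.join,
    show (((2 : Int) * 3).toNat : Int) = 6 from rfl,
    show (((1 : Int) * 3).toNat : Int) = 3 from rfl,
    show (((0 : Int) * 3).toNat : Int) = 0 from rfl]
  rw [← h2, ← h1, ← h0]
  simp [String.append_assoc]
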